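-- pv_equiv track=rewrite | github.com/YunSubChoi/CodeAnalysisParsing | flawfinder.py | combine_duplicate_errors
-- ===== SOURCE A (Python) =====
-- def combine_duplicate_errors(tagText):
--     duplicate_tagNum = []
--     for i in range(0, len(tagText)-1, 1):
--         for j in range(i+1, len(tagText), 1):
--             if tagText[i][0]==tagText[j][0]:
--                 tagText[i][1] = tagText[i][1] + ';;;' + tagText[j][1]
--                 tagText[i][2] = tagText[i][2] + ';;;' + tagText[j][2]
--                 duplicate_tagNum.append(j)
--     tagTextLen = len(tagText)
--     for m in range(tagTextLen, 0, -1):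
--         if m in duplicate_tagNum:
--             del tagText[m]
--     return tagText
-- ===== SOURCE B (Python) =====
-- def combine_duplicate_errors(tagText):
--     result = []
--     rest = tagText
--     while rest:
--         first, rest = rest[0], rest[1:]
--         same = [r for r in rest if r[0] == first[0]]
--         if same:
--             first[1] = ';;;'.join([first[1]] + [r[1] for r in same])
--             first[2] = ';;;'.join([first[2]] + [r[2] for r in same])
--             rest = [r for r in rest if r[0] != first[0]]
--         result.append(first)
--     return result
-- ===== Notes on version B (the rewrite author's own statement) =====
-- stated objective: simpler
-- what changed: B replaces A's quadratic all-pairs index merging plus duplicate-index bookkeeping and a descending deletion pass by a single left-to-right grouping loop: take the first remaining row, join the fields of all later rows with the same key in one step, drop that key from the rest, and append to the result.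
import Mathlib
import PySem

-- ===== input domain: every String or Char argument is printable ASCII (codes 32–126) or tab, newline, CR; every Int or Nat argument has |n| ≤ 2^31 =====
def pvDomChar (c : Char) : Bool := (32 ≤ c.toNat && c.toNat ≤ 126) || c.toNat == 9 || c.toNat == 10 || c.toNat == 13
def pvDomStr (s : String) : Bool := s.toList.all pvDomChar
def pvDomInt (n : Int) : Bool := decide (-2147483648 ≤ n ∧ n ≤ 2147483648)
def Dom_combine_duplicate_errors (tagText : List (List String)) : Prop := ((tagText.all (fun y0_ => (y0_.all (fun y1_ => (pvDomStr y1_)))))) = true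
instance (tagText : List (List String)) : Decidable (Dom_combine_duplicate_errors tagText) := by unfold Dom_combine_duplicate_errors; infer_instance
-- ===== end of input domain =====

-- B groups rows by key in one left-to-right pass (take first row, join the fields of all later
-- same-key rows, recurse on the rest) instead of A's quadratic pairwise index merging followed by
-- a descending deletion pass; equivalence is about the RETURN value only (A rebinds/deletes inside
-- the caller's list and both A and B mutate the surviving rows in place).

-- ===== PORT A =====
-- literal port of A: rows are read with List.getD (every read is in range on inputs Pre_ admits),
-- `tagText[i][1] = …` is List.set, `del tagText[m]` is List.eraseIdx.
def combine_duplicate_errors (tagText : List (List String)) : List (List String) :=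
  let n : Int := tagText.length
  let st := (PySem.List.pyRange 0 (n - 1) 1).foldl (fun (st : List (List String) × List Int) i =>
    (PySem.List.pyRange (i + 1) n 1).foldl (fun (st : List (List String) × List Int) j =>
      let t := st.1
      if (t.getD i.toNat []).getD 0 "" == (t.getD j.toNat []).getD 0 "" then
        let ri := t.getD i.toNat []
        let rj := t.getD j.toNat []
        let ri := ri.set 1 (ri.getD 1 "" ++ ";;;" ++ rj.getD 1 "")
        let ri := ri.set 2 (ri.getD 2 "" ++ ";;;" ++ rj.getD 2 "")
        (t.set i.toNat ri, st.2 ++ [j])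
      else st) st) (tagText, ([] : List Int))
  (PySem.List.pyRange n 0 (-1)).foldl (fun t m =>
    if m ∈ st.2 then t.eraseIdx m.toNat else t) st.1

-- ===== PORT B =====
-- literal port of Source B's while-loop: `result` is the accumulator, `rest` shrinks each turn.
def combine_duplicate_errors_alt_go (result rest : List (List String)) : List (List String) :=
  match rest with
  | [] => result
  | first :: rest' =>
    let same := rest'.filter (fun r => r.getD 0 "" == first.getD 0 "")
    if same = [] then combine_duplicate_errors_alt_go (result ++ [first]) rest'
    else
      let first' := first.set 1 (PySem.Str.join ";;;" ([first.getD 1 ""] ++ same.map (fun r => r.getD 1 "")))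
      let first' := first'.set 2 (PySem.Str.join ";;;" ([first'.getD 2 ""] ++ same.map (fun r => r.getD 2 "")))
      combine_duplicate_errors_alt_go (result ++ [first']) (rest'.filter (fun r => !(r.getD 0 "" == first'.getD 0 "")))
termination_by rest.length
decreasing_by
  · simp
  · simp only [List.length_cons, List.length_unattach]
    exact Nat.lt_succ_of_le ((List.length_filter_le _ _).trans (le_of_eq List.length_attach))

def combine_duplicate_errors_alt (tagText : List (List String)) : List (List String) :=
  combine_duplicate_errors_alt_go [] tagText

-- ===== PRECONDITION & SPEC =====
-- Pre_ excludes exactly the inputs on which Python A raises IndexError: with at least two rows,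
-- some row is empty (tagText[i][0] fails) or some row whose key occurs twice has fewer than
-- three fields (tagText[i][1] / tagText[i][2] fail).
def Pre_combine_duplicate_errors (tagText : List (List String)) : Prop :=
  tagText.length ≤ 1 ∨
    ∀ r ∈ tagText, r ≠ [] ∧
      (2 ≤ tagText.countP (fun q => q.getD 0 "" == r.getD 0 "") → 3 ≤ r.length)
instance (tagText : List (List String)) : Decidable (Pre_combine_duplicate_errors tagText) := by
  unfold Pre_combine_duplicate_errors; infer_instance
def pvWitness_combine_duplicate_errors : List (List String) :=
  [["a", "b", "c"], ["a", "p", "q"], ["z"]]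

def Spec_combine_duplicate_errors (tagText : List (List String)) (out : List (List String)) : Prop := out = combine_duplicate_errors_alt tagText
instance (tagText : List (List String)) (out : List (List String)) : Decidable (Spec_combine_duplicate_errors tagText out) := by unfold Spec_combine_duplicate_errors; infer_instance

-- ===== CLAIM (what is proved, stated in full; the proofs are below) =====
def Claim_equal_combine_duplicate_errors : Prop := ∀ (tagText : List (List String)), Dom_combine_duplicate_errors tagText → Pre_combine_duplicate_errors tagText → Spec_combine_duplicate_errors tagText (combine_duplicate_errors tagText)

-- ===== LEMMAS AND PROOFS =====

-- The key (field 0) of a row, with Python's IndexError positions read as "".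
def pvKey (r : List String) : String := r.getD 0 ""

-- One merge step of A: fields 1 and 2 of `q` are appended (with ';;;') to row `a`.
def pvMerge1 (a q : List String) : List String :=
  let a1 := a.set 1 (a.getD 1 "" ++ ";;;" ++ q.getD 1 "")
  a1.set 2 (a1.getD 2 "" ++ ";;;" ++ q.getD 2 "")

def pvMergeAll (r : List String) (qs : List (List String)) : List String := qs.foldl pvMerge1 r

-- What A's first phase leaves at each position: the row merged with all later same-key rows.
def pvM (t : List (List String)) : List (List String) :=
  t.mapIdx (fun p r => pvMergeAll r ((t.drop (p + 1)).filter (fun q => pvKey q == pvKey r)))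

-- Recursive model shared by both sides.
def pvModel : List (List String) → List (List String)
  | [] => []
  | r :: rs =>
    pvMergeAll r (rs.filter (fun q => pvKey q == pvKey r)) ::
      pvModel (rs.filter (fun q => !(pvKey q == pvKey r)))
termination_by l => l.length
decreasing_by
  simp only [List.length_cons, List.length_unattach]
  exact Nat.lt_succ_of_le ((List.length_filter_le _ _).trans (le_of_eq List.length_attach))

-- Keep the rows whose position p has q p = false.
def pvIdxFilter (q : Nat → Bool) : List (List String) → List (List String)
  | [] => []
  | r :: rs => if q 0 then pvIdxFilter (fun p => q (p + 1)) rs else r :: pvIdxFilter (fun p => q (p + 1)) rs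

def pvHasEarlier (t : List (List String)) (m : Nat) : Bool :=
  (List.range m).any (fun p => pvKey (t.getD p []) == pvKey (t.getD m []))

-- A's intermediate table after the outer iterations 0..i-1.
def pvT (t0 : List (List String)) (i : Nat) : List (List String) :=
  t0.mapIdx (fun p r => if p < i then pvMergeAll r ((t0.drop (p + 1)).filter (fun q => pvKey q == pvKey r)) else r)

-- A's duplicate_tagNum after the outer iterations 0..i-1.
def pvDups (t0 : List (List String)) (i : Nat) : List Int :=
  (List.range i).flatMap (fun p =>
    ((List.range' (p + 1) (t0.length - (p + 1))).filter
        (fun j => pvKey (t0.getD j []) == pvKey (t0.getD p []))).map (fun (j : Nat) => (j : Int)))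

def pvStep (i j : Nat) (st : List (List String) × List Int) : List (List String) × List Int :=
  let t := st.1
  if (t.getD i []).getD 0 "" == (t.getD j []).getD 0 "" then
    let ri := t.getD i []
    let rj := t.getD j []
    let ri := ri.set 1 (ri.getD 1 "" ++ ";;;" ++ rj.getD 1 "")
    let ri := ri.set 2 (ri.getD 2 "" ++ ";;;" ++ rj.getD 2 "")
    (t.set i ri, st.2 ++ [(j : Int)])
  else st

theorem pv_str_ext {a b : String} (h : a.toList = b.toList) : a = b := by
  have := congrArg String.ofList h; simpa using this

theorem pv_jfold (s : String) (l : List String) : ∀ x : String,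
    PySem.Str.join s (x :: l) = l.foldl (fun a b => a ++ s ++ b) x := by
  induction l with
  | nil => intro x; simp [PySem.Str.join, PySem.Chars.join_singleton]
  | cons b l ih =>
    intro x
    have h : PySem.Str.join s (x :: b :: l) = PySem.Str.join s ((x ++ s ++ b) :: l) := by
      apply pv_str_ext
      cases l <;> simp [PySem.Str.join, PySem.Chars.join_singleton, PySem.Chars.join_cons_cons]
    rw [h, ih]
    rfl

theorem pv_setD_self (l : List String) (i : Nat) : l.set i (l.getD i "") = l := by
  by_cases h : i < l.length
  · simp [List.getD_eq_getElem?_getD, List.getElem?_eq_getElem h, List.set_getElem_self]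
  · exact List.set_eq_of_length_le (by omega)

theorem pv_setD_self' (l : List (List String)) (i : Nat) : l.set i (l.getD i []) = l := by
  by_cases h : i < l.length
  · simp [List.getD_eq_getElem?_getD, List.getElem?_eq_getElem h, List.set_getElem_self]
  · exact List.set_eq_of_length_le (by omega)


theorem pv_beq_comm (a b : String) : (a == b) = (b == a) := by
  by_cases h : a = b
  · simp [h]
  · have h' : ¬ b = a := fun e => h e.symm
    simp [h, h']

theorem pv_merge1_key (a q : List String) : pvKey (pvMerge1 a q) = pvKey a := by
  simp only [pvMerge1, pvKey, List.getD_eq_getElem?_getD]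
  rw [List.getElem?_set_ne (by decide), List.getElem?_set_ne (by decide)]

theorem pv_mergeAll_short (r : List String) (qs : List (List String)) (h : r.length ≤ 1) :
    pvMergeAll r qs = r := by
  induction qs generalizing r with
  | nil => rfl
  | cons q qs ih =>
    have h1 : pvMerge1 r q = r := by
      have e1 : ∀ (v : String), r.set 1 v = r := fun v => List.set_eq_of_length_le (by omega)
      have e2 : ∀ (v : String), r.set 2 v = r := fun v => List.set_eq_of_length_le (by omega)
      simp only [pvMerge1, e1, e2]
    show pvMergeAll (pvMerge1 r q) qs = r
    rw [h1, ih r h]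

theorem pv_mergeAll_two (r : List String) (qs : List (List String)) (h : r.length = 2) :
    pvMergeAll r qs = r.set 1 (qs.foldl (fun a q => a ++ ";;;" ++ q.getD 1 "") (r.getD 1 "")) := by
  induction qs generalizing r with
  | nil => exact (pv_setD_self r 1).symm
  | cons q qs ih =>
    have h1 : pvMerge1 r q = r.set 1 (r.getD 1 "" ++ ";;;" ++ q.getD 1 "") := by
      simp only [pvMerge1]
      rw [List.set_eq_of_length_le (by simp [h])]
    show pvMergeAll (pvMerge1 r q) qs = _
    rw [h1, ih _ (by simp [h])]
    rw [List.set_set]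
    congr 1
    simp only [List.foldl_cons]
    congr 1
    simp [List.getD_eq_getElem?_getD, List.getElem?_set_self (by omega : 1 < r.length)]

theorem pv_mergeAll_big (r : List String) (qs : List (List String)) (h : 3 ≤ r.length) :
    pvMergeAll r qs =
      (r.set 1 (qs.foldl (fun a q => a ++ ";;;" ++ q.getD 1 "") (r.getD 1 ""))).set 2
        (qs.foldl (fun a q => a ++ ";;;" ++ q.getD 2 "") (r.getD 2 "")) := by
  induction qs generalizing r with
  | nil =>
    show r = _
    simp only [List.foldl_nil]
    rw [pv_setD_self r 1, pv_setD_self r 2]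
  | cons q qs ih =>
    show pvMergeAll (pvMerge1 r q) qs = _
    rw [ih _ (by simp [pvMerge1, h])]
    have e1 : (pvMerge1 r q).getD 1 "" = r.getD 1 "" ++ ";;;" ++ q.getD 1 "" := by
      simp only [pvMerge1]
      rw [List.getD_eq_getElem?_getD, List.getElem?_set_ne (by decide),
        List.getElem?_set_self (by omega : 1 < r.length)]
      rfl
    have e2 : (pvMerge1 r q).getD 2 "" = r.getD 2 "" ++ ";;;" ++ q.getD 2 "" := by
      simp only [pvMerge1]
      rw [List.getD_eq_getElem?_getD, List.getElem?_set_self (by simp; omega)]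
      simp [List.getD_eq_getElem?_getD, List.getElem?_set_ne (by decide : (1:Nat) ≠ 2)]
    have hb : pvMerge1 r q = (r.set 1 (r.getD 1 "" ++ ";;;" ++ q.getD 1 "")).set 2
        (r.getD 2 "" ++ ";;;" ++ q.getD 2 "") := by
      simp only [pvMerge1]
      congr 1
      rw [List.getD_eq_getElem?_getD, List.getElem?_set_ne (by decide)]
      rfl
    rw [e1, e2, hb]
    rw [List.set_comm _ _ (by decide : (1:Nat) ≠ 2), List.set_set,
      List.set_comm _ _ (by decide : (2:Nat) ≠ 1), List.set_set]
    rfl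

theorem pv_merge_join (r : List String) (qs : List (List String)) :
    pvMergeAll r qs =
      (r.set 1 (PySem.Str.join ";;;" (r.getD 1 "" :: qs.map (fun q => q.getD 1 "")))).set 2
        (PySem.Str.join ";;;" (r.getD 2 "" :: qs.map (fun q => q.getD 2 ""))) := by
  rw [pv_jfold, pv_jfold, List.foldl_map, List.foldl_map]
  by_cases h1 : r.length ≤ 1
  · rw [pv_mergeAll_short r qs h1]
    have e1 : ∀ v : String, r.set 1 v = r := fun v => List.set_eq_of_length_le (by omega)
    have e2 : ∀ v : String, r.set 2 v = r := fun v => List.set_eq_of_length_le (by omega)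
    rw [e1, e2]
  · by_cases h2 : r.length = 2
    · rw [pv_mergeAll_two r qs h2]
      conv_rhs => rw [List.set_eq_of_length_le (by simp [h2])]
    · rw [pv_mergeAll_big r qs (by omega)]

theorem pv_first'_eq (first : List String) (same : List (List String)) :
    (first.set 1 (PySem.Str.join ";;;" ([first.getD 1 ""] ++ same.map (fun r => r.getD 1 "")))).set 2
        (PySem.Str.join ";;;"
          ([(first.set 1 (PySem.Str.join ";;;" ([first.getD 1 ""] ++ same.map (fun r => r.getD 1 "")))).getD 2 ""]
            ++ same.map (fun r => r.getD 2 "")))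
      = pvMergeAll first same := by
  have e : ∀ v : String, (first.set 1 v).getD 2 "" = first.getD 2 "" := by
    intro v
    rw [List.getD_eq_getElem?_getD, List.getElem?_set_ne (by decide), ← List.getD_eq_getElem?_getD]
  rw [e, pv_merge_join]
  simp only [List.singleton_append]

theorem pv_key0_of_set (first : List String) (v w : String) :
    ((first.set 1 v).set 2 w).getD 0 "" = first.getD 0 "" := by
  rw [List.getD_eq_getElem?_getD, List.getElem?_set_ne (by decide), List.getElem?_set_ne (by decide),
    ← List.getD_eq_getElem?_getD]

theorem pv_bgo_model : ∀ (fuel : Nat) (rest : List (List String)), rest.length ≤ fuel →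
    ∀ (result : List (List String)),
      combine_duplicate_errors_alt_go result rest = result ++ pvModel rest := by
  intro fuel
  induction fuel with
  | zero =>
    intro rest h result
    have : rest = [] := List.eq_nil_of_length_eq_zero (by omega)
    subst this
    simp [combine_duplicate_errors_alt_go, pvModel]
  | succ n ih =>
    intro rest h result
    match rest with
    | [] => simp [combine_duplicate_errors_alt_go, pvModel]
    | first :: rest' =>
      rw [combine_duplicate_errors_alt_go, pvModel]
      by_cases hsame : rest'.filter (fun r => r.getD 0 "" == first.getD 0 "") = []
      · rw [if_pos hsame]
        rw [ih rest' (by simpa using Nat.le_of_succ_le_succ h)]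
        have hall : ∀ q ∈ rest', ¬(q.getD 0 "" == first.getD 0 "") := by
          intro q hq
          have := List.filter_eq_nil_iff.mp hsame q hq
          simpa using this
        have hfil : rest'.filter (fun q => !(q.getD 0 "" == first.getD 0 "")) = rest' := by
          apply List.filter_eq_self.mpr
          intro q hq
          simpa using hall q hq
        simp only [pvKey]
        rw [hsame, hfil]
        show result ++ [first] ++ pvModel rest' = result ++ (pvMergeAll first [] :: pvModel rest')
        simp [pvMergeAll]
      · rw [if_neg hsame]
        rw [ih _ (by
          have := List.length_filter_le
            (fun r => !(r.getD 0 "" == ((first.set 1 (PySem.Str.join ";;;" ([first.getD 1 ""] ++ (rest'.filter (fun r => r.getD 0 "" == first.getD 0 "")).map (fun r => r.getD 1 "")))).set 2 (PySem.Str.join ";;;" ([(first.set 1 (PySem.Str.join ";;;" ([first.getD 1 ""] ++ (rest'.filter (fun r => r.getD 0 "" == first.getD 0 "")).map (fun r => r.getD 1 "")))).getD 2 ""] ++ (rest'.filter (fun r => r.getD 0 "" == first.getD 0 "")).map (fun r => r.getD 2 "")))).getD 0 "")) rest'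
          simp only [List.length_cons] at h
          omega)]
        rw [pv_key0_of_set, pv_first'_eq]
        simp only [pvKey, List.append_assoc, List.singleton_append]

theorem pv_alt_model (t : List (List String)) : combine_duplicate_errors_alt t = pvModel t := by
  simpa using pv_bgo_model t.length t le_rfl []

theorem pv_idxFilter_congr : ∀ (l : List (List String)) (q1 q2 : Nat → Bool),
    (∀ p < l.length, q1 p = q2 p) → pvIdxFilter q1 l = pvIdxFilter q2 l := by
  intro l
  induction l with
  | nil => intro _ _ _; rfl
  | cons r rs ih =>
    intro q1 q2 h
    simp only [pvIdxFilter]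
    rw [h 0 (by simp), ih (fun p => q1 (p + 1)) (fun p => q2 (p + 1))
      (fun p hp => h (p + 1) (by simp; omega))]

theorem pv_M_cons (r : List String) (rs : List (List String)) :
    pvM (r :: rs) = pvMergeAll r (rs.filter (fun q => pvKey q == pvKey r)) :: pvM rs := by
  simp [pvM, List.mapIdx_cons, List.drop_succ_cons]

theorem pv_hasEarlier_cons (r : List String) (rs : List (List String)) (p : Nat) :
    pvHasEarlier (r :: rs) (p + 1) = ((pvKey r == pvKey (rs.getD p [])) || pvHasEarlier rs p) := by
  simp [pvHasEarlier, List.range_succ_eq_map, List.any_map, Function.comp_def]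

theorem pv_seen : ∀ (fuel : Nat) (rs : List (List String)), rs.length ≤ fuel → ∀ (S : List String),
    pvIdxFilter (fun p => decide (pvKey (rs.getD p []) ∈ S) || pvHasEarlier rs p) (pvM rs)
      = pvModel (rs.filter (fun q => !decide (pvKey q ∈ S))) := by
  intro fuel
  induction fuel with
  | zero =>
    intro rs h S
    have : rs = [] := List.eq_nil_of_length_eq_zero (by omega)
    subst this
    simp [pvM, pvIdxFilter, pvModel]
  | succ n ih =>
    intro rs h S
    match rs with
    | [] => simp [pvM, pvIdxFilter, pvModel]
    | r :: rs' =>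
      have hlen : rs'.length ≤ n := by simp only [List.length_cons] at h; omega
      have hshift : ∀ p, (decide (pvKey ((r :: rs').getD (p + 1) []) ∈ S) || pvHasEarlier (r :: rs') (p + 1))
          = (decide (pvKey (rs'.getD p []) ∈ (pvKey r :: S)) || pvHasEarlier rs' p) := by
        intro p
        rw [pv_hasEarlier_cons]
        simp only [List.getD_cons_succ, List.getD_eq_getElem?_getD, List.mem_cons]
        by_cases hx : pvKey (rs'[p]?.getD []) = pvKey r
        · have hb : (pvKey r == pvKey (rs'[p]?.getD [])) = true := by rw [hx]; simp
          simp [hx, hb]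
        · have hb : (pvKey r == pvKey (rs'[p]?.getD [])) = false := by
            simp only [beq_eq_false_iff_ne]
            exact fun hc => hx hc.symm
          have hd : decide (pvKey (rs'[p]?.getD []) = pvKey r ∨ pvKey (rs'[p]?.getD []) ∈ S)
              = decide (pvKey (rs'[p]?.getD []) ∈ S) := by
            apply decide_eq_decide.mpr
            constructor
            · rintro (hc | hc)
              · exact absurd hc hx
              · exact hc
            · exact Or.inr
          simp only [hb, Bool.false_or, hd, List.getElem?_cons_succ]
          rfl
      rw [pv_M_cons]
      by_cases hS : pvKey r ∈ S
      · simp only [pvIdxFilter]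
        rw [if_pos (by simp [List.getD_cons_zero, hS, pvHasEarlier])]
        rw [pv_idxFilter_congr _ _ _ (fun p _ => hshift p), ih rs' hlen (pvKey r :: S)]
        have hfe : rs'.filter (fun q => !decide (pvKey q ∈ (pvKey r :: S)))
            = rs'.filter (fun q => !decide (pvKey q ∈ S)) := by
          apply List.filter_congr
          intro q _
          by_cases hq : pvKey q ∈ S
          · simp [hq, List.mem_cons]
          · have : ¬ pvKey q ∈ (pvKey r :: S) := by
              simp only [List.mem_cons]
              rintro (hqq | hqq)
              · exact hq (hqq ▸ hS)
              · exact hq hqq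
            simp [hq, this]
        rw [hfe]
        have hhead : ((r :: rs').filter (fun q => !decide (pvKey q ∈ S)))
            = rs'.filter (fun q => !decide (pvKey q ∈ S)) := by
          rw [List.filter_cons]
          simp [hS]
        rw [hhead]
      · simp only [pvIdxFilter]
        rw [if_neg (by simp [List.getD_cons_zero, hS, pvHasEarlier])]
        rw [pv_idxFilter_congr _ _ _ (fun p _ => hshift p), ih rs' hlen (pvKey r :: S)]
        have hhead : ((r :: rs').filter (fun q => !decide (pvKey q ∈ S)))
            = r :: rs'.filter (fun q => !decide (pvKey q ∈ S)) := by
          rw [List.filter_cons]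
          simp [hS]
        rw [hhead, pvModel]
        congr 1
        · congr 1
          rw [List.filter_filter]
          apply (List.filter_congr ?_).symm
          intro q _
          by_cases hk : pvKey q == pvKey r
          · have : pvKey q = pvKey r := by simpa using hk
            simp [hk, this, hS]
          · simp [hk]
        · congr 1
          rw [List.filter_filter]
          apply List.filter_congr
          intro q _
          by_cases hk : pvKey q = pvKey r
          · simp [hk, List.mem_cons]
          · have hb : (pvKey q == pvKey r) = false := by simpa using hk
            simp [hb, hk, List.mem_cons]

theorem pv_model_idxFilter (t : List (List String)) :
    pvIdxFilter (pvHasEarlier t) (pvM t) = pvModel t := by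
  have h2 : pvIdxFilter (fun p => decide (pvKey (t.getD p []) ∈ ([] : List String)) || pvHasEarlier t p) (pvM t)
      = pvIdxFilter (pvHasEarlier t) (pvM t) :=
    pv_idxFilter_congr _ _ _ (by intro p _; simp)
  rw [← h2, pv_seen t.length t le_rfl []]
  congr 1
  apply List.filter_eq_self.mpr
  intro q _
  simp

theorem pv_len_pvT (t0 : List (List String)) (i : Nat) : (pvT t0 i).length = t0.length := by
  simp [pvT]

theorem pv_getD_pvT (t0 : List (List String)) (i p : Nat) (hp : ¬ p < i) :
    (pvT t0 i).getD p [] = t0.getD p [] := by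
  by_cases h2 : p < t0.length
  · have hl : p < (pvT t0 i).length := by rw [pv_len_pvT]; exact h2
    rw [List.getD_eq_getElem?_getD, List.getD_eq_getElem?_getD,
      List.getElem?_eq_getElem hl, List.getElem?_eq_getElem h2]
    simp [pvT, List.getElem_mapIdx, hp]
  · have hl : (pvT t0 i).length ≤ p := by rw [pv_len_pvT]; omega
    rw [List.getD_eq_getElem?_getD, List.getD_eq_getElem?_getD,
      List.getElem?_eq_none hl, List.getElem?_eq_none (by omega)]

theorem pv_map_getD_range' : ∀ (c : Nat) (t : List (List String)) (p : Nat), c = t.length - p →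
    (List.range' p c).map (fun j => t.getD j []) = t.drop p := by
  intro c
  induction c with
  | zero =>
    intro t p h
    rw [List.range'_zero, List.map_nil, List.drop_eq_nil_of_le (by omega)]
  | succ c ih =>
    intro t p h
    have hp : p < t.length := by omega
    rw [List.range'_succ, List.map_cons, ih t (p + 1) (by omega),
      List.drop_eq_getElem_cons hp, List.getD_eq_getElem?_getD, List.getElem?_eq_getElem hp]
    rfl

theorem pv_inner_go (t0 : List (List String)) (i : Nat) (hi : i < t0.length) :
    ∀ (js : List Nat) (acc : List String) (d : List Int), (∀ j ∈ js, i < j) →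
      pvKey acc = pvKey (t0.getD i []) →
      js.foldl (fun st j => pvStep i j st) ((pvT t0 i).set i acc, d) =
        ((pvT t0 i).set i (pvMergeAll acc
            ((js.filter (fun j => pvKey (t0.getD j []) == pvKey (t0.getD i []))).map (fun j => t0.getD j []))),
          d ++ (js.filter (fun j => pvKey (t0.getD j []) == pvKey (t0.getD i []))).map (fun (j : Nat) => (j : Int))) := by
  intro js
  induction js with
  | nil =>
    intro acc d _ _
    simp [pvMergeAll]
  | cons j js ih =>
    intro acc d hj hk
    have hij : i < j := hj j (by simp)
    have hil : i < ((pvT t0 i).set i acc).length := by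
      rw [List.length_set, pv_len_pvT]; exact hi
    have hacc : ((pvT t0 i).set i acc).getD i [] = acc := by
      rw [List.getD_eq_getElem?_getD, List.getElem?_set_self (by rw [pv_len_pvT]; exact hi)]
      rfl
    have hgj : ((pvT t0 i).set i acc).getD j [] = t0.getD j [] := by
      rw [List.getD_eq_getElem?_getD, List.getElem?_set_ne (by omega), ← List.getD_eq_getElem?_getD]
      exact pv_getD_pvT t0 i j (by omega)
    rw [List.foldl_cons, List.filter_cons]
    have hguard : ((((pvT t0 i).set i acc).getD i []).getD 0 ""
          == (((pvT t0 i).set i acc).getD j []).getD 0 "")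
        = (pvKey (t0.getD j []) == pvKey (t0.getD i [])) := by
      rw [hacc, hgj]
      show (pvKey acc == pvKey (t0.getD j [])) = _
      rw [hk, pv_beq_comm]
    by_cases hcase : (pvKey (t0.getD j []) == pvKey (t0.getD i [])) = true
    · have hstep : pvStep i j ((pvT t0 i).set i acc, d)
          = ((pvT t0 i).set i (pvMerge1 acc (t0.getD j [])), d ++ [(j : Int)]) := by
        simp only [pvStep]
        rw [if_pos (by rw [hguard]; exact hcase)]
        rw [hacc, hgj, List.set_set]
        rfl
      rw [hstep, ih (pvMerge1 acc (t0.getD j [])) (d ++ [(j : Int)])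
        (fun x hx => hj x (by simp [hx])) (by rw [pv_merge1_key, hk])]
      rw [if_pos hcase]
      simp only [List.map_cons, List.append_assoc, List.singleton_append]
      rfl
    · have hstep : pvStep i j ((pvT t0 i).set i acc, d) = ((pvT t0 i).set i acc, d) := by
        simp only [pvStep]
        rw [if_neg (by rw [hguard]; exact hcase)]
      rw [hstep, ih acc d (fun x hx => hj x (by simp [hx])) hk, if_neg hcase]

theorem pv_inner_eval (t0 : List (List String)) (i : Nat) (hi : i < t0.length) (d : List Int) :
    (List.range' (i + 1) (t0.length - (i + 1))).foldl (fun st j => pvStep i j st) (pvT t0 i, d)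
      = (pvT t0 (i + 1),
          d ++ ((List.range' (i + 1) (t0.length - (i + 1))).filter
              (fun j => pvKey (t0.getD j []) == pvKey (t0.getD i []))).map (fun (j : Nat) => (j : Int))) := by
  have hbase : pvT t0 i = (pvT t0 i).set i (t0.getD i []) := by
    rw [← pv_getD_pvT t0 i i (by omega), pv_setD_self']
  conv_lhs => rw [hbase]
  rw [pv_inner_go t0 i hi _ _ d (by
    intro j hjm
    have := List.mem_range'_1.mp hjm
    omega) rfl]
  congr 1
  have hfm : ((List.range' (i + 1) (t0.length - (i + 1))).filter
        (fun j => pvKey (t0.getD j []) == pvKey (t0.getD i []))).map (fun j => t0.getD j [])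
      = (((List.range' (i + 1) (t0.length - (i + 1))).map (fun j => t0.getD j [])).filter
          (fun q => pvKey q == pvKey (t0.getD i []))) := by
    conv_rhs => rw [List.filter_map]
    rfl
  rw [hfm, pv_map_getD_range' (t0.length - (i + 1)) t0 (i + 1) rfl]
  apply List.ext_getElem (by simp [pv_len_pvT])
  intro p h1 h2
  simp only [List.length_set, pv_len_pvT] at h1
  have hgd : t0.getD i [] = t0[i] := by
    rw [List.getD_eq_getElem?_getD, List.getElem?_eq_getElem hi]
    rfl
  by_cases hpi : p = i
  · subst hpi
    rw [List.getElem_set_self (by simp only [List.length_set, pv_len_pvT]; exact hi)]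
    simp only [pvT, List.getElem_mapIdx]
    rw [if_pos (by omega), hgd]
  · rw [List.getElem_set_ne (by omega)]
    simp only [pvT, List.getElem_mapIdx]
    by_cases hlt : p < i
    · rw [if_pos hlt, if_pos (by omega)]
    · rw [if_neg hlt, if_neg (by omega)]

theorem pv_T_zero (t0 : List (List String)) : pvT t0 0 = t0 := by
  apply List.ext_getElem (by simp [pv_len_pvT])
  intro p h1 h2
  simp [pvT, List.getElem_mapIdx]

theorem pv_phase1 (t0 : List (List String)) : ∀ i, i ≤ t0.length →
    (List.range i).foldl
        (fun st i => (List.range' (i + 1) (t0.length - (i + 1))).foldl (fun st j => pvStep i j st) st)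
        (t0, ([] : List Int))
      = (pvT t0 i, pvDups t0 i) := by
  intro i
  induction i with
  | zero =>
    intro _
    rw [List.range_zero, List.foldl_nil, pv_T_zero]
    rfl
  | succ i ih =>
    intro h
    rw [List.range_succ, List.foldl_append, ih (by omega), List.foldl_cons, List.foldl_nil]
    rw [pv_inner_eval t0 i (by omega)]
    congr 1
    simp only [pvDups, List.range_succ, List.flatMap_append, List.flatMap_cons, List.flatMap_nil,
      List.append_nil]

theorem pv_T_eq_M (t0 : List (List String)) : pvT t0 (t0.length - 1) = pvM t0 := by
  apply List.ext_getElem (by simp [pv_len_pvT, pvM])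
  intro p h1 h2
  simp only [pv_len_pvT] at h1
  simp only [pvT, pvM, List.getElem_mapIdx]
  by_cases hlt : p < t0.length - 1
  · rw [if_pos hlt]
  · rw [if_neg hlt]
    have hp : p + 1 = t0.length := by omega
    rw [hp, List.drop_length, List.filter_nil]
    rfl

theorem pv_mem_dups (t0 : List (List String)) (m : Nat) (hm : m < t0.length) :
    ((m : Int) ∈ pvDups t0 (t0.length - 1)) ↔ pvHasEarlier t0 m = true := by
  simp only [pvDups, List.mem_flatMap, List.mem_map, List.mem_filter, List.mem_range,
    List.mem_range'_1, pvHasEarlier, List.any_eq_true]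
  constructor
  · rintro ⟨p, hp, j, ⟨⟨hj1, hjk⟩, hjc⟩⟩
    have hjm : j = m := by omega
    subst hjm
    rw [pv_beq_comm] at hjk
    exact ⟨p, by omega, hjk⟩
  · rintro ⟨p, hp, hk⟩
    rw [pv_beq_comm] at hk
    exact ⟨p, by omega, m, ⟨⟨by omega, hk⟩, rfl⟩⟩

theorem pv_zero_not_mem_dups (t0 : List (List String)) (i : Nat) : ¬ ((0 : Int) ∈ pvDups t0 i) := by
  intro h
  simp only [pvDups] at h
  rw [List.mem_flatMap] at h
  obtain ⟨p, hp, hj⟩ := h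
  rw [List.mem_map] at hj
  obtain ⟨j, hjf, hj0⟩ := hj
  rw [List.mem_filter] at hjf
  have := List.mem_range'_1.mp hjf.1
  omega

theorem pv_delShift (q : Nat → Prop) [inst : DecidablePred q] (r : List String) :
    ∀ (ms : List Nat) (rs : List (List String)), (∀ m ∈ ms, 1 ≤ m) →
      ms.foldl (fun t m => if q m then t.eraseIdx m else t) (r :: rs)
        = r :: (ms.map (· - 1)).foldl (fun t m => if q (m + 1) then t.eraseIdx m else t) rs := by
  intro ms
  induction ms with
  | nil => intro rs _; rfl
  | cons m ms ih =>
    intro rs hm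
    have h1 : 1 ≤ m := hm m (by simp)
    simp only [List.foldl_cons, List.map_cons]
    have hqe : q m ↔ q ((m - 1) + 1) := by rw [Nat.sub_add_cancel h1]
    by_cases hq : q m
    · rw [if_pos hq, if_pos (hqe.mp hq)]
      have he : (r :: rs).eraseIdx m = r :: rs.eraseIdx (m - 1) := by
        conv_lhs => rw [show m = (m - 1) + 1 from (Nat.sub_add_cancel h1).symm]
        rw [List.eraseIdx_cons_succ]
      rw [he]
      exact ih _ (fun x hx => hm x (by simp [hx]))
    · rw [if_neg hq, if_neg (fun hc => hq (hqe.mpr hc))]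
      exact ih _ (fun x hx => hm x (by simp [hx]))

theorem pv_rev_range_succ (k : Nat) :
    (List.range (k + 1)).reverse = ((List.range' 1 k).reverse) ++ [0] := by
  rw [List.range_succ_eq_map, List.reverse_cons]
  congr 1
  congr 1
  rw [List.range'_eq_map_range]
  apply List.map_congr_left
  intro x _
  omega

theorem pv_map_sub_one (k : Nat) :
    (((List.range' 1 k).reverse).map (· - 1)) = (List.range k).reverse := by
  rw [List.map_reverse, List.range'_eq_map_range, List.map_map]
  congr 1
  have : ((· - 1) ∘ (1 + ·) : Nat → Nat) = id := by
    funext x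
    simp
  rw [this, List.map_id]

theorem pv_delG : ∀ (t : List (List String)) (q : Nat → Prop) (inst : DecidablePred q),
    ((List.range (t.length + 1)).reverse).foldl (fun t m => if q m then t.eraseIdx m else t) t
      = pvIdxFilter (fun p => decide (q p)) t := by
  intro t
  induction t with
  | nil =>
    intro q inst
    show [0].foldl _ [] = _
    by_cases hq : q 0 <;> simp [pvIdxFilter, hq, List.eraseIdx]
  | cons r rs ih =>
    intro q inst
    rw [show (r :: rs).length + 1 = (rs.length + 1) + 1 by simp, pv_rev_range_succ,
      List.foldl_append]
    rw [pv_delShift q r _ rs (by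
      intro m hm
      rw [List.mem_reverse, List.mem_range'_1] at hm
      omega)]
    rw [pv_map_sub_one, pv_rev_range_succ, ← pv_rev_range_succ]
    rw [show (List.range (rs.length + 1)).reverse
        = (List.range (rs.length + 1)).reverse from rfl]
    rw [ih (fun p => q (p + 1)) (fun p => inst (p + 1))]
    simp only [List.foldl_cons, List.foldl_nil, pvIdxFilter]
    by_cases hq : q 0
    · rw [if_pos hq, if_pos (by simp [hq]), List.eraseIdx_cons_zero]
    · rw [if_neg hq, if_neg (by simp [hq])]

theorem pv_pyRange_up0 (b : Int) :
    PySem.List.pyRange 0 b 1 = (List.range b.toNat).map (fun m : Nat => (m : Int)) := by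
  rw [PySem.List.pyRange_one]
  simp

theorem pv_pyRange_up (k n : Nat) :
    PySem.List.pyRange ((k : Int) + 1) (n : Int) 1
      = (List.range' (k + 1) (n - (k + 1))).map (fun m : Nat => (m : Int)) := by
  rw [PySem.List.pyRange_one]
  have h1 : ((n : Int) - ((k : Int) + 1)).toNat = n - (k + 1) := by omega
  rw [h1, List.range'_eq_map_range, List.map_map]
  apply List.map_congr_left
  intro x _
  simp only [Function.comp_apply]
  push_cast
  ring

theorem pv_pyRange_down (n : Nat) :
    PySem.List.pyRange (n : Int) 0 (-1) = ((List.range' 1 n).reverse).map (fun m : Nat => (m : Int)) := by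
  rw [PySem.List.pyRange_neg_one]
  apply List.ext_getElem (by simp)
  intro p h1 h2
  simp only [List.getElem_map, List.getElem_reverse, List.getElem_range, List.getElem_range',
    List.length_range', List.length_reverse]
  simp only [List.length_map, List.length_range] at h1
  simp only [List.length_map, List.length_reverse, List.length_range'] at h2
  omega

theorem pv_del_apply (t0 : List (List String)) (D : List Int) (t : List (List String))
    (hlen : t.length = t0.length) (h0 : ¬ ((0 : Int) ∈ D)) :
    ((List.range' 1 t0.length).reverse).foldl
        (fun (t : List (List String)) (m : Nat) => if (m : Int) ∈ D then t.eraseIdx m else t) t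
      = pvIdxFilter (fun p => decide ((p : Int) ∈ D)) t := by
  have h := pv_delG t (fun m => ((m : Int) ∈ D)) (fun m => inferInstance)
  rw [pv_rev_range_succ, List.foldl_append] at h
  simp only [List.foldl_cons, List.foldl_nil, Nat.cast_zero] at h
  rw [if_neg h0] at h
  rw [hlen] at h
  exact h

theorem pv_A_eq (t0 : List (List String)) :
    combine_duplicate_errors t0 = pvIdxFilter (pvHasEarlier t0) (pvM t0) := by
  have hn : ((t0.length : Int) - 1).toNat = t0.length - 1 := by omega
  simp only [combine_duplicate_errors]
  rw [pv_pyRange_up0, hn, pv_pyRange_down, List.foldl_map, List.foldl_map]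
  simp only [pv_pyRange_up, List.foldl_map, Int.toNat_natCast]
  have hph := pv_phase1 t0 (t0.length - 1) (by omega)
  simp only [pvStep] at hph
  rw [hph]
  rw [pv_del_apply t0 (pvDups t0 (t0.length - 1)) (pvT t0 (t0.length - 1)) (pv_len_pvT _ _)
    (pv_zero_not_mem_dups _ _)]
  rw [pv_T_eq_M]
  apply pv_idxFilter_congr
  intro p hp
  have hp' : p < t0.length := by simpa [pvM] using hp
  have hiff := pv_mem_dups t0 p hp'
  by_cases hmem : ((p : Int) ∈ pvDups t0 (t0.length - 1))
  · rw [decide_eq_true hmem, (hiff.mp hmem).symm]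
  · have hne : ¬ pvHasEarlier t0 p = true := fun h => hmem (hiff.mpr h)
    rw [decide_eq_false hmem]
    cases hE : pvHasEarlier t0 p
    · rfl
    · exact absurd hE hne

theorem pv_A_model (t0 : List (List String)) : combine_duplicate_errors t0 = pvModel t0 := by
  rw [pv_A_eq, pv_model_idxFilter]

-- ===== VERDICT (by name: the statement is the Claim_ definition above) =====
theorem combine_duplicate_errors_spec : Claim_equal_combine_duplicate_errors := by
  intro tagText _ _
  unfold Spec_combine_duplicate_errors
  rw [pv_A_model, pv_alt_model]
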